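-- pv_equiv track=rewrite | github.com/ICAR-BIOINFORMATICS/OrganoIsolate | OI.py | create_ada_mark
-- ===== SOURCE A (Python) =====
-- def create_ada_mark(read, numb, mark_len):
--   #extract the begining nucleotide sequence
--   mark = read[:mark_len]
--   j=0
--   number=0
--   #begin from the last character
--   for i in range(mark_len-1,-1,-1):
--     #convert each char to number, then multiply by the 5^position-1
--     number += numb[mark[i]]*(5**j)
--     j+=1
--   return number
-- ===== SOURCE B (Python) =====
-- def create_ada_mark(read, numb, mark_len):
--   # Horner's method, scanning left to right: no slice, no power table.
--   number = 0
--   for i in range(mark_len):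
--     number = number * 5 + numb[read[i]]
--   return number
-- ===== Notes on version B (the rewrite author's own statement) =====
-- stated objective: simpler
-- what changed: Replaces the backwards loop with an explicit 5**j power and a separate slice/counter by a single forward Horner pass (number = number*5 + digit), dropping the slice and the j variable.
import Mathlib
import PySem

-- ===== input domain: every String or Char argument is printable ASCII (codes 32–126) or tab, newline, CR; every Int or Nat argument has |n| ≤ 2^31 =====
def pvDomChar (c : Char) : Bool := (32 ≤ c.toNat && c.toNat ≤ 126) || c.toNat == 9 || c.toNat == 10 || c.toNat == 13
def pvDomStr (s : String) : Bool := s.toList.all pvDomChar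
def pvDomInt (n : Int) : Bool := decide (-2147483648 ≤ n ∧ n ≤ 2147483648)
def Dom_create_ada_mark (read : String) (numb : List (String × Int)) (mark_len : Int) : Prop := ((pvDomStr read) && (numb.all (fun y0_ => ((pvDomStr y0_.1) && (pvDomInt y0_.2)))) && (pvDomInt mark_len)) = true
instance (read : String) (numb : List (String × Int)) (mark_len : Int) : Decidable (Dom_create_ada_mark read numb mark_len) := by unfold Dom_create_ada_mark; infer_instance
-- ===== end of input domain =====

-- B replaces A's backwards loop with an explicit 5**j power (and the slice it reads from)
-- by a single forward Horner pass (number = number*5 + digit); objective: simpler.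

-- shared helper: the Python dict lookup numb[<char>] (the char is a 1-char string key);
-- total with default 0 — Pre_ excludes the inputs where Python raises KeyError/IndexError.
def pvLookup (numb : List (String × Int)) (oc : Option Char) : Int :=
  match oc with
  | some c => PySem.Dict.getD (PySem.Dict.mk numb) (String.ofList [c]) 0
  | none => 0

-- ===== PORT A =====
def create_ada_mark (read : String) (numb : List (String × Int)) (mark_len : Int) : Int :=
  -- mark = read[:mark_len]
  let mark := PySem.List.slice read.toList none (some mark_len)
  -- for i in range(mark_len-1,-1,-1): number += numb[mark[i]]*(5**j); j += 1
  ((PySem.List.pyRange (mark_len - 1) (-1) (-1)).foldl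
    (fun (s : Int × Int) i => (s.1 + pvLookup numb (PySem.List.pyGet? mark i) * 5 ^ s.2.toNat, s.2 + 1))
    (0, 0)).1

-- ===== PORT B =====
def create_ada_mark_alt (read : String) (numb : List (String × Int)) (mark_len : Int) : Int :=
  -- for i in range(mark_len): number = number*5 + numb[read[i]]
  (PySem.List.pyRange 0 mark_len 1).foldl
    (fun number i => number * 5 + pvLookup numb (PySem.List.pyGet? read.toList i)) 0

-- ===== PRECONDITION & SPEC =====
-- Pre_ excludes exactly the inputs where the Python raises: mark_len beyond the read's
-- length (IndexError on mark[i]) or a scanned character missing from numb (KeyError).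
def Pre_create_ada_mark (read : String) (numb : List (String × Int)) (mark_len : Int) : Prop :=
  mark_len ≤ (read.toList.length : Int) ∧
  ((read.toList.take mark_len.toNat).all
    (fun c => ((PySem.Dict.mk numb).get? (String.ofList [c])).isSome)) = true
instance (read : String) (numb : List (String × Int)) (mark_len : Int) : Decidable (Pre_create_ada_mark read numb mark_len) := by unfold Pre_create_ada_mark; infer_instance

def pvWitness_create_ada_mark : String × (List (String × Int)) × Int :=
  ("ACGT", [("A", 0), ("C", 1), ("G", 2), ("T", 3)], 3)

def Spec_create_ada_mark (read : String) (numb : List (String × Int)) (mark_len : Int) (out : Int) : Prop := out = create_ada_mark_alt read numb mark_len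
instance (read : String) (numb : List (String × Int)) (mark_len : Int) (out : Int) : Decidable (Spec_create_ada_mark read numb mark_len out) := by unfold Spec_create_ada_mark; infer_instance

-- ===== CLAIM (what is proved, stated in full; the proofs are below) =====
def Claim_equal_create_ada_mark : Prop := ∀ (read : String) (numb : List (String × Int)) (mark_len : Int), Dom_create_ada_mark read numb mark_len → Pre_create_ada_mark read numb mark_len → Spec_create_ada_mark read numb mark_len (create_ada_mark read numb mark_len)

-- ===== LEMMAS AND PROOFS =====

-- B's loop over range(0, m+1) peels its last step off.
theorem pv_horner_step (φ : Int → Int) (m : Nat) :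
    (PySem.List.pyRange 0 ((m:Int)+1) 1).foldl (fun acc i => acc*5 + φ i) 0
    = (PySem.List.pyRange 0 (m:Int) 1).foldl (fun acc i => acc*5 + φ i) 0 * 5 + φ m := by
  rw [PySem.List.pyRange_one_succ_right (by positivity)]
  simp

-- A's descending power loop equals 5^j times B's Horner loop.
theorem pv_descend_eq (φ : Int → Int) (m : Nat) (num j : Int) (hj : 0 ≤ j) :
    ((PySem.List.pyRange ((m:Int)-1) (-1) (-1)).foldl
      (fun (s : Int × Int) i => (s.1 + φ i * 5 ^ s.2.toNat, s.2 + 1)) (num, j)).1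
    = num + 5 ^ j.toNat * (PySem.List.pyRange 0 (m:Int) 1).foldl (fun acc i => acc*5 + φ i) 0 := by
  induction m generalizing num j with
  | zero =>
      simp [PySem.List.pyRange_one_eq_nil (by omega : ((0:Nat):Int) ≤ 0)]
  | succ m ih =>
      rw [show ((m+1:Nat):Int) - 1 = (m:Int) by push_cast; ring,
          PySem.List.pyRange_neg_one_cons (by omega : (-1:Int) < (m:Int))]
      simp only [List.foldl_cons]
      rw [ih (num + φ m * 5 ^ j.toNat) (j+1) (by omega)]
      rw [show ((m+1:Nat):Int) = (m:Int)+1 by push_cast; ring, pv_horner_step]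
      rw [show (j+1).toNat = j.toNat + 1 by omega]
      ring

-- ===== VERDICT (by name: the statement is the Claim_ definition above) =====
theorem create_ada_mark_spec : Claim_equal_create_ada_mark := by
  intro read numb mark_len _ hpre
  unfold Spec_create_ada_mark
  simp only [create_ada_mark, create_ada_mark_alt]
  by_cases h0 : 0 ≤ mark_len
  · have hn : mark_len = ((mark_len.toNat : Nat) : Int) := (Int.toNat_of_nonneg h0).symm
    rw [hn, pv_descend_eq _ mark_len.toNat 0 0 le_rfl]
    simp only [Int.toNat_zero, pow_zero, one_mul, zero_add]
    apply PySem.List.foldl_congr_mem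
    intro acc x hx
    rw [PySem.List.mem_pyRange_one] at hx
    have hx0 : 0 ≤ x := hx.1
    have hxn : x.toNat < mark_len.toNat := by omega
    congr 1
    rw [PySem.List.slice_to_natCast,
        PySem.List.pyGet?_of_nonneg _ hx0, PySem.List.pyGet?_of_nonneg _ hx0,
        List.getElem?_take, if_pos hxn]
  · rw [PySem.List.pyRange_neg_one_eq_nil (by omega),
        PySem.List.pyRange_one_eq_nil (by omega)]
    simp
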